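-- pv_equiv track=rewrite | github.com/sungikje/_algorithm | 프로그래머스/1/133502. 햄버거 만들기/햄버거 만들기.py | solution
-- ===== SOURCE A (Python) =====
-- def solution(ingredient):
--     answer = 0
--
--     burger = [1,2,3,1]
--
--     i = 0
--     while True:
--         checkBurger = ingredient[i:i+4]
--         if len(checkBurger) != 4:
--             break
--
--         else:
--             if checkBurger == burger:
--                 answer += 1
--                 for _ in range(4):
--                     del ingredient[i]
--                 if i - 4 >0:
--                     i -= 4
--                 else:
--                     i = -1
--
--         i += 1
--
--     return answer
-- ===== SOURCE B (Python) =====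
-- def solution(ingredient):
--     stack = []
--     answer = 0
--     for x in ingredient:
--         stack.append(x)
--         if stack[-4:] == [1, 2, 3, 1]:
--             del stack[-4:]
--             answer += 1
--     return answer
-- ===== Notes on version B (the rewrite author's own statement) =====
-- stated objective: simpler
-- what changed: A repeatedly slices a 4-window, deletes matched elements from the list in place and backtracks its index; B makes a single forward pass pushing each ingredient on a stack and popping four whenever the top four read [1,2,3,1].
import Mathlib
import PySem

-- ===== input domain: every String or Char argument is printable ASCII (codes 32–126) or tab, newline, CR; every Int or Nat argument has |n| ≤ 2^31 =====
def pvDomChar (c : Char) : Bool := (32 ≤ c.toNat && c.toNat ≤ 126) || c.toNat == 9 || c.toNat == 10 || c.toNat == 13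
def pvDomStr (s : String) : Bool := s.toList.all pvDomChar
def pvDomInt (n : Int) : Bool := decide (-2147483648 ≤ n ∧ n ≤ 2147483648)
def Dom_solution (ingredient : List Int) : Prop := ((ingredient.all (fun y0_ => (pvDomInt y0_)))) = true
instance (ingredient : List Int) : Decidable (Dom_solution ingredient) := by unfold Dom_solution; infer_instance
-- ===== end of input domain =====

-- B replaces A's delete-and-backtrack scan over the mutated list with a single-pass stack
-- (push each ingredient, pop 4 whenever the top four read [1,2,3,1]).
-- A mutates its argument in place (deletes matched windows); the equivalence proved here is
-- about the RETURN value only — B does not mutate its argument.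

-- ===== PORT A =====
-- 'ingredient[i:i+4]' (i : Nat is A's loop index, which is always ≥ 0)
def pvWin (cur : List Int) (i : Nat) : List Int :=
  PySem.List.slice cur (some (i : Int)) (some ((i : Int) + 4))

-- 'for _ in range(4): del ingredient[i]'  (each del is Python's take i ++ drop (i+1); all four
-- indices are in range here because the 4-element window at i exists)
def pvDelFour (cur : List Int) (i : Nat) : List Int :=
  (List.range 4).foldl (fun xs _ => xs.take i ++ xs.drop (i + 1)) cur

-- the while-loop of A: i is the scan index, answer the count.  The fuel argument only
-- makes the recursion structural; solution passes enough fuel for every input (each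
-- iteration strictly decreases cur.length * 2 + 4 - i, see aLoop_eq below), so the
-- fuel-0 branch is never reached.
def aLoop : Nat → List Int → Nat → Int → Int
  | 0, _, _, answer => answer
  | fuel + 1, cur, i, answer =>
    let checkBurger := pvWin cur i
    if checkBurger.length ≠ 4 then answer
    else
      if checkBurger = [1, 2, 3, 1] then
        aLoop fuel (pvDelFour cur i) (if 0 < (i : Int) - 4 then i - 3 else 0) (answer + 1)
      else
        aLoop fuel cur (i + 1) answer

def solution (ingredient : List Int) : Int := aLoop (ingredient.length * 2 + 5) ingredient 0 0

-- ===== PORT B =====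
-- one iteration of B's for-loop; the stack is kept most-recent-first, so Python's
-- 'stack[-4:] == [1,2,3,1]' is 'take 4 = [1,3,2,1]' and 'del stack[-4:]' is 'drop 4'
def bStep (st : List Int × Int) (x : Int) : List Int × Int :=
  let s := x :: st.1
  if s.take 4 = [1, 3, 2, 1] then (s.drop 4, st.2 + 1) else (s, st.2)

def solution_alt (ingredient : List Int) : Int :=
  (ingredient.foldl bStep ([], 0)).2

-- ===== PRECONDITION & SPEC =====
def Spec_solution (ingredient : List Int) (out : Int) : Prop := out = solution_alt ingredient
instance (ingredient : List Int) (out : Int) : Decidable (Spec_solution ingredient out) := by unfold Spec_solution; infer_instance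

-- ===== CLAIM (what is proved, stated in full; the proofs are below) =====
def Claim_equal_solution : Prop := ∀ (ingredient : List Int), Dom_solution ingredient → Spec_solution ingredient (solution ingredient)

-- ===== LEMMAS AND PROOFS =====

-- what the A-side helpers compute
theorem pvWin_eq (cur : List Int) (i : Nat) : pvWin cur i = (cur.drop i).take 4 := by
  unfold pvWin
  rw [PySem.List.slice_toNat cur (by positivity) (by positivity)]
  simp
  congr 1
  omega
theorem pvWin_len4 (cur : List Int) (i : Nat) (h : (pvWin cur i).length = 4) :
    i + 4 ≤ cur.length := by
  rw [pvWin_eq] at h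
  simp at h
  omega
theorem pvDelFour_eq (cur : List Int) (i : Nat) (h : i + 4 ≤ cur.length) :
    pvDelFour cur i = cur.take i ++ cur.drop (i + 4) := by
  unfold pvDelFour
  simp only [List.range_succ, List.range_zero, List.nil_append, List.foldl_append,
    List.foldl_cons, List.foldl_nil]
  have step : ∀ k, (cur.take i ++ cur.drop (i + k)).take i = cur.take i ∧
      (cur.take i ++ cur.drop (i + k)).drop (i + 1) = cur.drop (i + k + 1) := by
    intro k
    have hl : (cur.take i).length = i := by simp; omega
    constructor
    · exact List.take_left' hl
    · rw [List.drop_append, List.drop_eq_nil_of_le (by omega),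
        List.nil_append, List.drop_drop, hl, show i + 1 - i = 1 by omega]
  conv_lhs => rw [show cur = cur.take i ++ cur.drop (i + 0) by simp]
  rw [(step 0).1, (step 0).2, (step 1).1, (step 1).2, (step 2).1, (step 2).2,
      (step 3).1, (step 3).2]
theorem pvDelFour_length (cur : List Int) (i : Nat) (h : i + 4 ≤ cur.length) :
    (pvDelFour cur i).length = cur.length - 4 := by
  rw [pvDelFour_eq cur i h]
  simp
  omega

-- 'the pattern occurs in xs starting at position j'
def occAt (xs : List Int) (j : Nat) : Prop := (xs.drop j).take 4 = [1, 2, 3, 1]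

theorem occAt_le_length {xs : List Int} {j : Nat} (h : occAt xs j) : j + 4 ≤ xs.length := by
  unfold occAt at h
  have : ((xs.drop j).take 4).length = 4 := by rw [h]; rfl
  simp at this
  omega

-- reversed-stack pop test, read off the un-reversed list
theorem rev_take4_iff (l : List Int) :
    l.reverse.take 4 = [1, 3, 2, 1] ↔ 4 ≤ l.length ∧ l.drop (l.length - 4) = [1, 2, 3, 1] := by
  by_cases h : 4 ≤ l.length
  · have hld : (l.drop (l.length - 4)).length = 4 := by simp; omega
    rw [List.take_reverse]
    constructor
    · intro he
      refine ⟨h, ?_⟩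
      have := congrArg List.reverse he
      simpa using this
    · intro ⟨_, he⟩
      rw [he]
      rfl
  · constructor
    · intro he
      have : (l.reverse.take 4).length = 4 := by rw [he]; rfl
      simp at this
      omega
    · intro ⟨h4, _⟩; omega

-- the pop test after pushing the m-th element of cur onto a so-far-clean stack
theorem rev_take_prefix_iff (cur : List Int) (m : Nat) (hm : m ≤ cur.length) :
    (cur.take m).reverse.take 4 = [1, 3, 2, 1] ↔ 4 ≤ m ∧ occAt cur (m - 4) := by
  rw [rev_take4_iff]
  have hlen : (cur.take m).length = m := by simp; omega
  rw [hlen]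
  unfold occAt
  constructor
  · intro ⟨h4, he⟩
    refine ⟨h4, ?_⟩
    rw [List.drop_take, show m - (m - 4) = 4 by omega] at he
    exact he
  · intro ⟨h4, he⟩
    refine ⟨h4, ?_⟩
    rw [List.drop_take, show m - (m - 4) = 4 by omega]
    exact he

-- a run of clean pushes: if the pop test fails after each push, the fold just stacks ys
theorem foldl_clean (ys : List Int) : ∀ (s : List Int) (c : Int),
    (∀ k, k < ys.length → ¬ ((ys.take (k + 1)).reverse ++ s).take 4 = [1, 3, 2, 1]) →
    ys.foldl bStep (s, c) = (ys.reverse ++ s, c) := by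
  induction ys with
  | nil => intro s c _; simp
  | cons y ys ih =>
    intro s c hcond
    have h0 : ¬ (y :: s).take 4 = [1, 3, 2, 1] := by
      have h := hcond 0 (by simp)
      rw [show (List.take (0 + 1) (y :: ys)).reverse ++ s = y :: s by simp] at h
      exact h
    have hstep : bStep (s, c) y = (y :: s, c) := by
      simp only [bStep]
      rw [if_neg h0]
    have htail : ∀ k, k < ys.length →
        ¬ ((ys.take (k + 1)).reverse ++ (y :: s)).take 4 = [1, 3, 2, 1] := by
      intro k hk
      have h := hcond (k + 1) (by simp; omega)
      rw [show (List.take (k + 1 + 1) (y :: ys)).reverse ++ s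
            = (List.take (k + 1) ys).reverse ++ (y :: s) by
          simp [List.take_succ_cons, List.append_assoc]] at h
      exact h
    calc (y :: ys).foldl bStep (s, c) = ys.foldl bStep (y :: s, c) := by
          rw [List.foldl_cons, hstep]
      _ = (ys.reverse ++ (y :: s), c) := ih (y :: s) c htail
      _ = ((y :: ys).reverse ++ s, c) := by simp

-- the count threads additively through the fold
theorem foldl_shift (ys : List Int) : ∀ (s : List Int) (c : Int),
    ys.foldl bStep (s, c) = ((ys.foldl bStep (s, 0)).1, c + (ys.foldl bStep (s, 0)).2) := by
  induction ys with
  | nil => intro s c; simp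
  | cons y ys ih =>
    intro s c
    have hstep : ∀ c', bStep (s, c') y = ((bStep (s, 0) y).1, c' + (bStep (s, 0) y).2) := by
      intro c'; simp only [bStep]; split <;> simp
    simp only [List.foldl_cons]
    rw [hstep c, hstep 0, zero_add]
    rw [ih (bStep (s, 0) y).1 (c + (bStep (s, 0) y).2), ih (bStep (s, 0) y).1 (bStep (s, 0) y).2]
    refine Prod.ext rfl ?_
    simp only
    ring

-- no occurrence before position i
def noOccBelow (xs : List Int) (i : Nat) : Prop := ∀ j, j < i → ¬ occAt xs j

-- B's fold, with the run split after a clean prefix of length m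
theorem cnt_split (cur : List Int) (m : Nat) (hm : m ≤ cur.length)
    (hclean : ∀ k, k < m → ¬ (4 ≤ k + 1 ∧ occAt cur (k + 1 - 4))) :
    cur.foldl bStep ([], 0) = (cur.drop m).foldl bStep ((cur.take m).reverse, 0) := by
  conv_lhs => rw [← List.take_append_drop m cur, List.foldl_append]
  congr 1
  rw [foldl_clean]
  · simp
  · intro k hk
    have hk' : k < m := by simpa [Nat.min_eq_left hm] using hk
    have htk : (cur.take m).take (k + 1) = cur.take (k + 1) := by
      rw [List.take_take]
      congr 1
      omega
    rw [htk, List.append_nil]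
    intro he
    exact hclean k hk' ((rev_take_prefix_iff cur (k + 1) (by omega)).1 he)

-- windows wholly inside the kept prefix survive the deletion
theorem occAt_del (cur : List Int) (i j : Nat) (hlen : i + 4 ≤ cur.length) (hj : j + 4 ≤ i)
    (ho : occAt (pvDelFour cur i) j) : occAt cur j := by
  unfold occAt at ho ⊢
  rw [pvDelFour_eq cur i hlen,
      List.drop_append_of_le_length (by simp; omega),
      List.drop_take,
      List.take_append_of_le_length (by simp; omega),
      List.take_take, Nat.min_eq_left (by omega)] at ho
  exact ho

-- key step: when the window at i matches and nothing matches earlier,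
-- B counts one more on cur than on the list with the window deleted
theorem cnt_del (cur : List Int) (i : Nat)
    (hwin : (cur.drop i).take 4 = [1, 2, 3, 1]) (hlen : i + 4 ≤ cur.length)
    (hno : noOccBelow cur i) :
    (cur.foldl bStep ([], 0)).2 = 1 + ((pvDelFour cur i).foldl bStep ([], 0)).2 := by
  have hcleanA : ∀ k, k < i + 3 → ¬ (4 ≤ k + 1 ∧ occAt cur (k + 1 - 4)) := by
    intro k hk ⟨h4, ho⟩
    exact hno (k + 1 - 4) (by omega) ho
  have hcleanB : ∀ k, k < i → ¬ (4 ≤ k + 1 ∧ occAt (pvDelFour cur i) (k + 1 - 4)) := by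
    intro k hk ⟨h4, ho⟩
    exact hno (k + 1 - 4) (by omega) (occAt_del cur i _ hlen (by omega) ho)
  have hd3 : cur.drop (i + 3) = 1 :: cur.drop (i + 4) := by
    have h1 : cur.drop i = [1, 2, 3, 1] ++ cur.drop (i + 4) := by
      conv_lhs => rw [← List.take_append_drop 4 (cur.drop i)]
      rw [hwin, List.drop_drop]
    have h2 : cur.drop (i + 3) = (cur.drop i).drop 3 := by
      rw [List.drop_drop]
    rw [h2, h1]
    rfl
  -- run on cur: clean to i+3, then the 4th pattern element fires the pop
  have hrunA : cur.foldl bStep ([], 0) =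
      (cur.drop (i + 4)).foldl bStep ((cur.take i).reverse, 1) := by
    rw [cnt_split cur (i + 3) (by omega) hcleanA, hd3, List.foldl_cons]
    congr 1
    have h1 : (1 : Int) :: (cur.take (i + 3)).reverse = (cur.take (i + 3) ++ [1]).reverse := by
      simp
    have hl : (cur.take (i + 3) ++ [(1 : Int)]).length = i + 4 := by simp; omega
    have hpop : ((1 : Int) :: (cur.take (i + 3)).reverse).take 4 = [1, 3, 2, 1] := by
      rw [h1, rev_take4_iff, hl]
      refine ⟨by omega, ?_⟩
      rw [show i + 4 - 4 = i from rfl,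
          List.drop_append_of_le_length (by simp; omega), List.drop_take,
          show i + 3 - i = 3 by omega,
          show (cur.drop i).take 3 = ((cur.drop i).take 4).take 3 by
            rw [List.take_take]; norm_num,
          hwin]
      rfl
    simp only [bStep]
    rw [if_pos hpop]
    refine Prod.ext ?_ rfl
    simp only
    rw [h1, List.drop_reverse, hl, show i + 4 - 4 = i from rfl,
        List.take_append_of_le_length (by simp; omega), List.take_take,
        Nat.min_eq_left (by omega)]
  -- run on the deleted list: same clean prefix, same tail
  have hrunB : (pvDelFour cur i).foldl bStep ([], 0) =
      (cur.drop (i + 4)).foldl bStep ((cur.take i).reverse, 0) := by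
    rw [cnt_split (pvDelFour cur i) i (by rw [pvDelFour_eq cur i hlen]; simp; omega) hcleanB,
        pvDelFour_eq cur i hlen]
    have hl : (cur.take i).length = i := by simp; omega
    rw [List.drop_left' hl, List.take_left' hl]
  rw [hrunA, hrunB, foldl_shift (cur.drop (i + 4)) ((cur.take i).reverse) 1]

-- the main invariant: with fuel above the loop measure, once no occurrence starts
-- before i, A's remaining loop adds exactly B's count
theorem aLoop_eq (fuel : Nat) : ∀ (cur : List Int) (i : Nat) (c : Int),
    cur.length * 2 + 4 - i < fuel → noOccBelow cur i →
    aLoop fuel cur i c = c + (cur.foldl bStep ([], 0)).2 := by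
  induction fuel with
  | zero => intro cur i c hf; omega
  | succ fuel ih =>
    intro cur i c hf hno
    show (let checkBurger := pvWin cur i
      if checkBurger.length ≠ 4 then c
      else
        if checkBurger = [1, 2, 3, 1] then
          aLoop fuel (pvDelFour cur i) (if 0 < (i : Int) - 4 then i - 3 else 0) (c + 1)
        else
          aLoop fuel cur (i + 1) c) = c + (cur.foldl bStep ([], 0)).2
    simp only
    by_cases hne : (pvWin cur i).length ≠ 4
    · -- break: the window is short, so no occurrence exists anywhere; B's fold never pops
      rw [if_pos hne]
      have hlen : cur.length < i + 4 := by
        by_contra h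
        exact hne (by rw [pvWin_eq]; simp; omega)
      have hnone : ∀ j, ¬ occAt cur j := by
        intro j hj
        have := occAt_le_length hj
        exact hno j (by omega) hj
      rw [cnt_split cur cur.length (le_refl _) (fun k hk ⟨_, ho⟩ => hnone _ ho)]
      simp
    · rw [if_neg hne]
      have hlen : i + 4 ≤ cur.length := pvWin_len4 cur i (not_ne_iff.mp hne)
      by_cases heq : pvWin cur i = [1, 2, 3, 1]
      · -- match at i: delete the window, back the index up; count via cnt_del
        rw [if_pos heq]
        have hwin : (cur.drop i).take 4 = [1, 2, 3, 1] := by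
          rw [← pvWin_eq cur i]; exact heq
        have hocc' : noOccBelow (pvDelFour cur i) (if 0 < (i : Int) - 4 then i - 3 else 0) := by
          intro j hj
          have hj4 : j + 4 ≤ i := by split at hj <;> omega
          intro ho
          exact hno j (by omega) (occAt_del cur i j hlen hj4 ho)
        have hfuel : (pvDelFour cur i).length * 2 + 4 -
            (if 0 < (i : Int) - 4 then i - 3 else 0) < fuel := by
          have h2 := pvDelFour_length cur i hlen
          split <;> omega
        rw [ih (pvDelFour cur i) _ (c + 1) hfuel hocc', cnt_del cur i hwin hlen hno]
        ring
      · -- no match at i: i advances, and position i is now also known clean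
        rw [if_neg heq]
        have hno' : noOccBelow cur (i + 1) := by
          intro j hj
          by_cases hji : j < i
          · exact hno j hji
          · have hje : j = i := by omega
            subst hje
            intro ho
            exact heq (by rw [pvWin_eq]; exact ho)
        exact ih cur (i + 1) c (by omega) hno'

-- ===== VERDICT (by name: the statement is the Claim_ definition above) =====
theorem solution_spec : Claim_equal_solution := by
  intro ingredient _
  unfold Spec_solution solution solution_alt
  rw [aLoop_eq (ingredient.length * 2 + 5) ingredient 0 0 (by omega)
      (fun j hj => absurd hj (Nat.not_lt_zero j))]
  simp
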